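-- pv_equiv track=rewrite | github.com/dcroque/projeto-es1 | scrapper.py | get_element_complement
-- ===== SOURCE A (Python) =====
-- def get_element_complement(text, element, complement, ini = 0):
-- 	search_element = "<" + element + " "
-- 	ini_pos = ini
-- 	while True:
-- 		ini_element_pos = text.find(search_element, ini_pos)
-- 		if ini_element_pos == -1:
-- 			return "no " + element +" with " + complement + " complement found"
-- 		end_element_pos = text.find(">", ini_element_pos)
-- 		ini_complement_pos = text.find(complement, ini_element_pos, end_element_pos)
-- 		if ini_complement_pos == -1:
-- 			ini_pos = end_element_pos
-- 		else:
-- 			ini_return = text.find('"', ini_complement_pos)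
-- 			end_return = text.find('"', ini_return+1)
-- 			return text[ini_return+1:end_return]
-- ===== SOURCE B (Python) =====
-- def _find_complement_attr(text, search_element, complement, start):
--     ini_element_pos = text.find(search_element, start)
--     if ini_element_pos == -1:
--         return None
--     end_element_pos = text.find(">", ini_element_pos)
--     ini_complement_pos = text.find(complement, ini_element_pos, end_element_pos)
--     if ini_complement_pos != -1:
--         return ini_complement_pos
--     return _find_complement_attr(text, search_element, complement, end_element_pos)
--
--
-- def get_element_complement(text, element, complement, ini = 0):
--     hit = _find_complement_attr(text, "<" + element + " ", complement, ini)
--     if hit is None: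
--         return "no " + element + " with " + complement + " complement found"
--     ini_return = text.find('"', hit)
--     end_return = text.find('"', ini_return + 1)
--     return text[ini_return + 1:end_return]
-- ===== Notes on version B (the rewrite author's own statement) =====
-- stated objective: simpler
-- what changed: The stateful while-True loop is replaced by a tail-recursive search helper that returns only the match position (or None), with the attribute extraction and the not-found message hoisted out of the loop into the top-level function.
import Mathlib
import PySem

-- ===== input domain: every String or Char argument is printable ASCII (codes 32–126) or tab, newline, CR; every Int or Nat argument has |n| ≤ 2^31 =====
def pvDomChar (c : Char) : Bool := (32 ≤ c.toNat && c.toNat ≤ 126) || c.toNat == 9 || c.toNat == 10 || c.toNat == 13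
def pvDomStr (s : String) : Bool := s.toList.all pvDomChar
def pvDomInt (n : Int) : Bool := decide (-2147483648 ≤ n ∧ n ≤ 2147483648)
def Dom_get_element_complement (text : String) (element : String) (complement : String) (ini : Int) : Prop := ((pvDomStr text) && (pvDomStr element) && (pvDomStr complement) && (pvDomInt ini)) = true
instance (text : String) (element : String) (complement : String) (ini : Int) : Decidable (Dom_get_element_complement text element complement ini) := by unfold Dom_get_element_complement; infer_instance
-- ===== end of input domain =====

-- B hoists the attribute extraction and the not-found message out of the search loop,
-- which becomes a tail-recursive helper returning the match position; same return value as A.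
-- ===== PORT A =====
-- the 'while True' loop of A; fuel only makes the recursion total in Lean (the loop's
-- restart position strictly increases, so text.length + 2 iterations are never exhausted)
def gecLoopA (text element complement search_element : String) : Nat → Int → String
  | 0, _ => "no " ++ element ++ " with " ++ complement ++ " complement found"
  | fuel + 1, ini_pos =>
    let ini_element_pos := PySem.Str.findFrom text search_element ini_pos none
    if ini_element_pos = -1 then
      "no " ++ element ++ " with " ++ complement ++ " complement found"
    else
      let end_element_pos := PySem.Str.findFrom text ">" ini_element_pos none
      let ini_complement_pos := PySem.Str.findFrom text complement ini_element_pos (some end_element_pos)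
      if ini_complement_pos = -1 then
        gecLoopA text element complement search_element fuel end_element_pos
      else
        let ini_return := PySem.Str.findFrom text "\"" ini_complement_pos none
        let end_return := PySem.Str.findFrom text "\"" (ini_return + 1) none
        PySem.Str.slice text (some (ini_return + 1)) (some end_return)

def get_element_complement (text : String) (element : String) (complement : String) (ini : Int) : String :=
  let search_element := "<" ++ element ++ " "
  gecLoopA text element complement search_element (text.toList.length + 2) ini

-- ===== PORT B =====
-- Source B's _find_complement_attr: tail recursion, fuel only for Lean totality (see above)
def findComplementAttr (text search_element complement : String) : Nat → Int → Option Int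
  | 0, _ => none
  | fuel + 1, start =>
    let ini_element_pos := PySem.Str.findFrom text search_element start none
    if ini_element_pos = -1 then
      none
    else
      let end_element_pos := PySem.Str.findFrom text ">" ini_element_pos none
      let ini_complement_pos := PySem.Str.findFrom text complement ini_element_pos (some end_element_pos)
      if ini_complement_pos ≠ -1 then
        some ini_complement_pos
      else
        findComplementAttr text search_element complement fuel end_element_pos

def get_element_complement_alt (text : String) (element : String) (complement : String) (ini : Int) : String :=
  match findComplementAttr text ("<" ++ element ++ " ") complement (text.toList.length + 2) ini with
  | none => "no " ++ element ++ " with " ++ complement ++ " complement found"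
  | some hit =>
    let ini_return := PySem.Str.findFrom text "\"" hit none
    let end_return := PySem.Str.findFrom text "\"" (ini_return + 1) none
    PySem.Str.slice text (some (ini_return + 1)) (some end_return)

-- ===== PRECONDITION & SPEC =====
def Spec_get_element_complement (text : String) (element : String) (complement : String) (ini : Int) (out : String) : Prop := out = get_element_complement_alt text element complement ini
instance (text : String) (element : String) (complement : String) (ini : Int) (out : String) : Decidable (Spec_get_element_complement text element complement ini out) := by unfold Spec_get_element_complement; infer_instance

-- ===== CLAIM (what is proved, stated in full; the proofs are below) =====
def Claim_equal_get_element_complement : Prop := ∀ (text : String) (element : String) (complement : String) (ini : Int), Dom_get_element_complement text element complement ini → Spec_get_element_complement text element complement ini (get_element_complement text element complement ini)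

-- ===== LEMMAS AND PROOFS =====
-- A's loop equals B's search helper followed by B's extraction / message, for every fuel
theorem gecLoopA_eq_helper (text element complement search_element : String) (fuel : Nat) (start : Int) :
    gecLoopA text element complement search_element fuel start =
      match findComplementAttr text search_element complement fuel start with
      | none => "no " ++ element ++ " with " ++ complement ++ " complement found"
      | some hit =>
        let ini_return := PySem.Str.findFrom text "\"" hit none
        let end_return := PySem.Str.findFrom text "\"" (ini_return + 1) none
        PySem.Str.slice text (some (ini_return + 1)) (some end_return) := by
  induction fuel generalizing start with
  | zero => rfl
  | succ n ih =>
    simp only [gecLoopA, findComplementAttr]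
    by_cases h1 : PySem.Str.findFrom text search_element start none = -1
    · simp only [h1, reduceIte]
    · by_cases h2 : PySem.Str.findFrom text complement (PySem.Str.findFrom text search_element start none)
        (some (PySem.Str.findFrom text ">" (PySem.Str.findFrom text search_element start none) none)) = -1
      · simp only [h1, if_neg, h2, if_pos, ne_eq, not_false_eq_true, if_false]
        exact ih _
      · simp only [h1, h2, ne_eq, not_false_eq_true, if_false, if_true]

-- ===== VERDICT (by name: the statement is the Claim_ definition above) =====
theorem get_element_complement_spec : Claim_equal_get_element_complement := by
  intro text element complement ini _
  unfold Spec_get_element_complement get_element_complement get_element_complement_alt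
  exact gecLoopA_eq_helper text element complement ("<" ++ element ++ " ") (text.toList.length + 2) ini
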